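-- pv_equiv track=rewrite | github.com/starcraftman/cogBot | cog/util.py | dict_to_columns
-- ===== SOURCE A (Python) =====
-- def dict_to_columns(data):
--     """
--     Transform the dict into columnar form with keys as column headers.
--     """
--     lines = []
--     header = []
--
--     for col, key in enumerate(sorted(data)):
--         header.append(f'{key} ({len(data[key])})')
--
--         for row, item in enumerate(data[key]):
--             try:
--                 lines[row]
--             except IndexError:
--                 lines.append([])
--             while len(lines[row]) != col:
--                 lines[row].append('')
--             lines[row].append(item)
--
--     return [header] + lines
-- ===== SOURCE B (Python) =====
-- def dict_to_columns(data):
--     """Row-major rebuild: header from sorted keys, then each row built across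
--     columns up to the last column that still has this row (no right padding)."""
--     keys = sorted(data)
--     cols = [data[k] for k in keys]
--     header = [f'{k} ({len(c)})' for k, c in zip(keys, cols)]
--     max_rows = max((len(c) for c in cols), default=0)
--     lines = []
--     for row in range(max_rows):
--         last = max(i for i, c in enumerate(cols) if row < len(c))
--         lines.append([c[row] if row < len(c) else '' for c in cols[:last + 1]])
--     return [header] + lines
-- ===== Notes on version B (the rewrite author's own statement) =====
-- stated objective: alternative
-- what changed: Column-major mutation of a growing jagged lines table (try/except growth, while-loop left-padding per cell) is replaced by a row-major rebuild: for each row index compute the last column that still owns this row and emit the row across columns in one comprehension.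
import Mathlib
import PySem

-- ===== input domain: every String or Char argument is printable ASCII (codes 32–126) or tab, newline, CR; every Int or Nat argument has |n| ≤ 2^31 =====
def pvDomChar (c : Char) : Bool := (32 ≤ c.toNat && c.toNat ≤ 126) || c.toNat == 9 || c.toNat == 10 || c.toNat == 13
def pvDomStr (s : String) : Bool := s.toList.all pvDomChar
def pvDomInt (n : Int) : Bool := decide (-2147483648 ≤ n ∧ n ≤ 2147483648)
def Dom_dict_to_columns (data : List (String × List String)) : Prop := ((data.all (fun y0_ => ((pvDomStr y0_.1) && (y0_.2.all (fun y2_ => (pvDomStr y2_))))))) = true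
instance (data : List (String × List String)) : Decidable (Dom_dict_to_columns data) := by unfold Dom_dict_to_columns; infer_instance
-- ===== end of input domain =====

-- B rebuilds the table row-major (per-row last-present column, no mutation) instead of A's
-- column-major in-place padding; objective: alternative decomposition, same asymptotic cost.

-- shared helper: the f-string  f'{key} ({len(data[key])})'  both sources format
def headerCell (k : String) (n : Nat) : String :=
  PySem.Str.join "" [k, " (", PySem.Int.toStr (n : Int), ")"]

-- ===== PORT A =====
-- the 'while len(lines[row]) != col: lines[row].append("")' loop (guard '<' only makes it total;
-- in A's runs the length never exceeds col)
def padEmpty (xs : List String) (col : Nat) : List String :=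
  if xs.length < col then padEmpty (xs ++ [""]) col else xs
termination_by col - xs.length
decreasing_by simp_all; omega

-- the inner 'for row, item in enumerate(data[key])' loop, row kept as a Nat counter
def aInner (col : Nat) (lines : List (List String)) (items : List String) : List (List String) :=
  (items.foldl
    (fun (st : List (List String) × Nat) item =>
      let lines := st.1
      let row := st.2
      let lines := if row < lines.length then lines else lines ++ [([] : List String)]
      let lines := lines.set row (padEmpty (lines.getD row []) col ++ [item])
      (lines, row + 1))
    (lines, 0)).1

def dict_to_columns (data : List (String × List String)) : List (List String) :=
  let d := PySem.Dict.ofList data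
  let st := (PySem.List.sorted d.keys (fun k => k) false).foldl
    (fun (st : List String × List (List String) × Nat) key =>
      let items := d.getD key []
      (st.1 ++ [headerCell key items.length], aInner st.2.2 st.2.1 items, st.2.2 + 1))
    ([], [], 0)
  st.1 :: st.2.1

-- ===== PORT B =====
-- last = max(i for i, c in enumerate(cols) if row < len(c))
def lastCol (cols : List (List String)) (row : Nat) : Nat :=
  ((cols.zipIdx).filter (fun p => decide (row < p.1.length))).foldl (fun m p => max m p.2) 0

-- one output line: [c[row] if row < len(c) else '' for c in cols[:last+1]]
def rowLine (cols : List (List String)) (row : Nat) : List String :=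
  (cols.take (lastCol cols row + 1)).map (fun c => c.getD row "")

def dict_to_columns_alt (data : List (String × List String)) : List (List String) :=
  let d := PySem.Dict.ofList data
  let keys := PySem.List.sorted d.keys (fun k => k) false
  let cols := keys.map (fun k => d.getD k [])
  let header := (keys.zip cols).map (fun p => headerCell p.1 p.2.length)
  let maxRows := cols.foldl (fun m c => max m c.length) 0
  header :: (List.range maxRows).map (rowLine cols)

-- ===== PRECONDITION & SPEC =====
def Spec_dict_to_columns (data : List (String × List String)) (out : List (List String)) : Prop := out = dict_to_columns_alt data
instance (data : List (String × List String)) (out : List (List String)) : Decidable (Spec_dict_to_columns data out) := by unfold Spec_dict_to_columns; infer_instance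

-- ===== CLAIM (what is proved, stated in full; the proofs are below) =====
def Claim_equal_dict_to_columns : Prop := ∀ (data : List (String × List String)), Dom_dict_to_columns data → Spec_dict_to_columns data (dict_to_columns data)

-- ===== LEMMAS AND PROOFS =====

def maxLen (cols : List (List String)) : Nat := cols.foldl (fun m c => max m c.length) 0

def specLines (cols : List (List String)) : List (List String) :=
  (List.range (maxLen cols)).map (rowLine cols)

-- closed form of one aInner pass
def mergeCol (n : Nat) (L : List (List String)) (c : List String) : List (List String) :=
  (List.range (max L.length c.length)).map (fun r =>
    if r < c.length then padEmpty (L.getD r []) n ++ [c.getD r ""] else L.getD r [])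

theorem padEmpty_eq (xs : List String) (n : Nat) :
    padEmpty xs n = xs ++ List.replicate (n - xs.length) "" := by
  fun_induction padEmpty xs n with
  | case1 xs h ih =>
      rw [ih]
      have h1 : n - xs.length = (n - (xs ++ [""]).length) + 1 := by simp; omega
      rw [h1, List.replicate_succ, List.append_assoc]
      rfl
  | case2 xs h =>
      have : n - xs.length = 0 := by omega
      simp [this]

theorem mergeCol_length (n : Nat) (L : List (List String)) (c : List String) :
    (mergeCol n L c).length = max L.length c.length := by
  simp [mergeCol]

theorem mergeCol_getElem (n : Nat) (L : List (List String)) (c : List String) (r : Nat)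
    (h : r < max L.length c.length) :
    (mergeCol n L c)[r]'(by rw [mergeCol_length]; exact h) =
      if r < c.length then padEmpty (L.getD r []) n ++ [c.getD r ""] else L.getD r [] := by
  simp [mergeCol]

theorem aInner_state (n : Nat) (L : List (List String)) (c : List String) :
    c.foldl
      (fun (st : List (List String) × Nat) item =>
        let lines := st.1
        let row := st.2
        let lines := if row < lines.length then lines else lines ++ [([] : List String)]
        let lines := lines.set row (padEmpty (lines.getD row []) n ++ [item])
        (lines, row + 1))
      (L, 0) = (mergeCol n L c, c.length) := by
  induction c using List.reverseRecOn with
  | nil =>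
      simp only [List.foldl_nil]
      refine Prod.ext ?_ (by simp)
      show L = mergeCol n L []
      apply List.ext_getElem
      · simp [mergeCol_length]
      · intro r h1 h2
        rw [mergeCol_getElem n L [] r (by omega)]
        simp [List.getD_eq_getElem?_getD, List.getElem?_eq_getElem h1]
  | append_singleton c x ih =>
      rw [List.foldl_append, ih]
      simp only [List.foldl_cons, List.foldl_nil]
      refine Prod.ext ?_ (by simp)
      show (if c.length < (mergeCol n L c).length then mergeCol n L c
              else mergeCol n L c ++ [([] : List String)]).set c.length
            (padEmpty ((if c.length < (mergeCol n L c).length then mergeCol n L c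
              else mergeCol n L c ++ [([] : List String)]).getD c.length []) n ++ [x])
          = mergeCol n L (c ++ [x])
      have hlx : (c ++ [x]).length = c.length + 1 := by simp
      have hgx : (c ++ [x]).getD c.length "" = x := by
        simp [List.getD_eq_getElem?_getD]
      have hgc : ∀ r, r < c.length → (c ++ [x]).getD r "" = c.getD r "" := by
        intro r hrc
        rw [List.getD_eq_getElem _ _ (by omega), List.getD_eq_getElem _ _ hrc]
        simp [hrc]
      by_cases hm : c.length < L.length
      · have hcond : c.length < (mergeCol n L c).length := by
          rw [mergeCol_length]; omega
        rw [if_pos hcond]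
        apply List.ext_getElem
        · simp only [List.length_set, mergeCol_length, List.length_append,
            List.length_cons, List.length_nil]
          omega
        · intro r h1 h2
          rw [List.getElem_set]
          rw [mergeCol_getElem n L (c ++ [x]) r (by simpa [mergeCol_length] using h2)]
          have hgD : (mergeCol n L c).getD c.length [] = L.getD c.length [] := by
            rw [List.getD_eq_getElem _ _ hcond,
              mergeCol_getElem n L c c.length (by omega)]
            simp
          by_cases hr : r = c.length
          · subst hr
            rw [if_pos rfl, hgD, if_pos (by omega), hgx]
          · have hrM : r < (mergeCol n L c).length := by
              simpa using h1
            rw [if_neg (fun hh => hr hh.symm),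
              mergeCol_getElem n L c r (by simpa [mergeCol_length] using hrM)]
            by_cases hrc : r < c.length
            · rw [if_pos hrc, if_pos (by omega), hgc r hrc]
            · rw [if_neg hrc, if_neg (by omega)]
      · have hML : (mergeCol n L c).length = c.length := by
          rw [mergeCol_length]; omega
        have hcond : ¬ c.length < (mergeCol n L c).length := by omega
        rw [if_neg hcond]
        have hgD : (mergeCol n L c ++ [[]]).getD c.length [] = ([] : List String) := by
          rw [List.getD_eq_getElem _ _ (by simp [hML])]
          simp [hML]
        rw [hgD]
        apply List.ext_getElem
        · simp only [List.length_set, List.length_append, mergeCol_length,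
            List.length_cons, List.length_nil]
          omega
        · intro r h1 h2
          rw [List.getElem_set]
          rw [mergeCol_getElem n L (c ++ [x]) r (by simpa [mergeCol_length] using h2)]
          by_cases hr : r = c.length
          · subst hr
            rw [if_pos rfl, if_pos (by omega)]
            have h1' : L.getD c.length [] = [] := by
              apply List.getD_eq_default
              omega
            rw [h1', hgx]
          · have hrc : r < c.length := by
              simp [hML] at h1
              omega
            rw [if_neg (fun hh => hr hh.symm), if_pos (by omega)]
            rw [List.getElem_append_left (by omega),
              mergeCol_getElem n L c r (by omega)]
            rw [if_pos hrc, hgc r hrc]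

theorem aInner_eq_mergeCol (n : Nat) (L : List (List String)) (c : List String) :
    aInner n L c = mergeCol n L c := by
  rw [aInner, aInner_state]

theorem maxLen_append (cols : List (List String)) (c : List String) :
    maxLen (cols ++ [c]) = max (maxLen cols) c.length := by
  simp [maxLen, List.foldl_append]

theorem nat_le_foldl_max (l : List Nat) (a : Nat) : a ≤ l.foldl max a := by
  induction l generalizing a with
  | nil => simp
  | cons x xs ih => exact le_trans (Nat.le_max_left a x) (ih (max a x))

theorem mem_le_foldl_max (l : List Nat) (a x : Nat) (hx : x ∈ l) : x ≤ l.foldl max a := by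
  induction l generalizing a with
  | nil => cases hx
  | cons y ys ih =>
      rcases List.mem_cons.mp hx with h | h
      · subst h
        exact le_trans (Nat.le_max_right a x) (nat_le_foldl_max ys (max a x))
      · exact ih (max a y) h

theorem foldl_max_le (l : List Nat) (a B : Nat) (ha : a ≤ B) (h : ∀ x ∈ l, x ≤ B) :
    l.foldl max a ≤ B := by
  induction l generalizing a with
  | nil => simpa using ha
  | cons y ys ih =>
      exact ih (max a y) (max_le ha (h y (by simp))) (fun x hx => h x (by simp [hx]))

theorem lt_maxLen (cols : List (List String)) (r : Nat) (h : r < maxLen cols) :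
    ∃ i, ∃ hi : i < cols.length, r < cols[i].length := by
  induction cols using List.reverseRecOn with
  | nil => simp [maxLen] at h
  | append_singleton cols c ih =>
      rw [maxLen_append] at h
      by_cases hc : r < c.length
      · exact ⟨cols.length, by simp, by simp [hc]⟩
      · obtain ⟨i, hi, hri⟩ := ih (by omega)
        exact ⟨i, by simp; omega, by simpa [List.getElem_append_left hi] using hri⟩

theorem lastCol_eq (cols : List (List String)) (r : Nat) :
    lastCol cols r =
      (((cols.zipIdx).filter (fun p => decide (r < p.1.length))).map (fun p => p.2)).foldl
        max 0 := by
  rw [lastCol, List.foldl_map]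

theorem mem_idx_lt (cols : List (List String)) (r : Nat) (x : Nat)
    (hx : x ∈ ((cols.zipIdx).filter (fun p => decide (r < p.1.length))).map (fun p => p.2)) :
    x < cols.length := by
  obtain ⟨p, hp, rfl⟩ := List.mem_map.mp hx
  have hpz := (List.mem_filter.mp hp).1
  have := (List.mem_zipIdx hpz).2.1
  omega

theorem lastCol_lt (cols : List (List String)) (r : Nat) (h : r < maxLen cols) :
    lastCol cols r < cols.length := by
  obtain ⟨i, hi, _⟩ := lt_maxLen cols r h
  rw [lastCol_eq]
  have hB : (((cols.zipIdx).filter (fun p => decide (r < p.1.length))).map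
      (fun p => p.2)).foldl max 0 ≤ cols.length - 1 := by
    apply foldl_max_le
    · omega
    · intro x hx
      have := mem_idx_lt cols r x hx
      omega
  omega

theorem lastCol_le (cols : List (List String)) (r i : Nat) (hi : i < cols.length)
    (h : r < cols[i].length) : i ≤ lastCol cols r := by
  rw [lastCol_eq]
  apply mem_le_foldl_max
  apply List.mem_map.mpr
  refine ⟨(cols[i], i), List.mem_filter.mpr ⟨?_, by simpa using h⟩, rfl⟩
  rw [List.mem_zipIdx_iff_getElem?]
  simp [List.getElem?_eq_getElem hi]

theorem lastCol_append_of_lt (cols : List (List String)) (c : List String) (r : Nat)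
    (h : r < c.length) : lastCol (cols ++ [c]) r = cols.length := by
  rw [lastCol_eq]
  have hz : (cols ++ [c]).zipIdx = cols.zipIdx ++ [(c, cols.length)] := by
    simp [List.zipIdx_append]
  rw [hz, List.filter_append, List.map_append, List.foldl_append]
  have hfc : List.filter (fun p => decide (r < p.1.length)) [(c, cols.length)] =
      [(c, cols.length)] := by
    simp [h]
  rw [hfc]
  simp only [List.map_cons, List.map_nil, List.foldl_cons, List.foldl_nil]
  have hle := foldl_max_le
    (((cols.zipIdx).filter (fun p => decide (r < p.1.length))).map (fun p => p.2)) 0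
    cols.length (by omega) (fun x hx => le_of_lt (mem_idx_lt cols r x hx))
  omega

theorem lastCol_append_of_ge (cols : List (List String)) (c : List String) (r : Nat)
    (h : ¬ r < c.length) : lastCol (cols ++ [c]) r = lastCol cols r := by
  rw [lastCol_eq, lastCol_eq]
  have hz : (cols ++ [c]).zipIdx = cols.zipIdx ++ [(c, cols.length)] := by
    simp [List.zipIdx_append]
  rw [hz, List.filter_append]
  have hfc : List.filter (fun p => decide (r < p.1.length)) [(c, cols.length)] = [] := by
    simp [h]
  rw [hfc, List.append_nil]

theorem maxLen_eq (cols : List (List String)) :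
    maxLen cols = (cols.map List.length).foldl max 0 := by
  rw [maxLen, List.foldl_map]

theorem len_le_maxLen (cols : List (List String)) (i : Nat) (hi : i < cols.length) :
    cols[i].length ≤ maxLen cols := by
  rw [maxLen_eq]
  apply mem_le_foldl_max
  exact List.mem_map.mpr ⟨cols[i], List.getElem_mem hi, rfl⟩

theorem rowLine_full (cols : List (List String)) (r : Nat) (h : r < maxLen cols) :
    rowLine cols r ++ List.replicate (cols.length - (lastCol cols r + 1)) "" =
      cols.map (fun c => c.getD r "") := by
  have hlt := lastCol_lt cols r h
  conv_rhs => rw [← List.take_append_drop (lastCol cols r + 1) cols, List.map_append]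
  rw [rowLine]
  congr 1
  apply List.ext_getElem
  · simp
  · intro i h1 h2
    have hlen : (List.replicate (cols.length - (lastCol cols r + 1)) ("" : String)).length
        = cols.length - (lastCol cols r + 1) := by simp
    rw [List.getElem_replicate, List.getElem_map, List.getElem_drop]
    have hidx : lastCol cols r + 1 + i < cols.length := by
      simp at h2
      omega
    have hnot : ¬ r < cols[lastCol cols r + 1 + i].length := by
      intro hcon
      have := lastCol_le cols r (lastCol cols r + 1 + i) hidx hcon
      omega
    rw [List.getD_eq_default]
    omega

theorem specLines_length (cols : List (List String)) :
    (specLines cols).length = maxLen cols := by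
  simp [specLines]

theorem specLines_getD (cols : List (List String)) (r : Nat) (h : r < maxLen cols) :
    (specLines cols).getD r [] = rowLine cols r := by
  rw [List.getD_eq_getElem _ _ (by rw [specLines_length]; exact h)]
  simp [specLines]

theorem specLines_getD_of_ge (cols : List (List String)) (r : Nat) (h : ¬ r < maxLen cols) :
    (specLines cols).getD r [] = [] := by
  apply List.getD_eq_default
  rw [specLines_length]
  omega

theorem padEmpty_spec (cols : List (List String)) (r : Nat) :
    padEmpty ((specLines cols).getD r []) cols.length = cols.map (fun c => c.getD r "") := by
  by_cases h : r < maxLen cols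
  · rw [specLines_getD cols r h, padEmpty_eq]
    have hlt := lastCol_lt cols r h
    have hlen : (rowLine cols r).length = lastCol cols r + 1 := by
      simp [rowLine]
      omega
    rw [hlen, ← rowLine_full cols r h]
  · rw [specLines_getD_of_ge cols r h, padEmpty_eq]
    simp only [List.nil_append, List.length_nil, Nat.sub_zero]
    apply List.ext_getElem
    · simp
    · intro i h1 h2
      rw [List.getElem_replicate, List.getElem_map]
      have hle := len_le_maxLen cols i (by simpa using h1)
      rw [List.getD_eq_default]
      omega

theorem mergeCol_spec (cols : List (List String)) (c : List String) :
    mergeCol cols.length (specLines cols) c = specLines (cols ++ [c]) := by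
  apply List.ext_getElem
  · simp [mergeCol_length, specLines_length, maxLen_append]
  · intro r h1 h2
    have hr : r < max (maxLen cols) c.length := by
      rw [mergeCol_length, specLines_length] at h1
      exact h1
    rw [mergeCol_getElem _ _ _ r (by rw [specLines_length]; exact hr)]
    have hrhs : (specLines (cols ++ [c]))[r] = rowLine (cols ++ [c]) r := by
      simp [specLines]
    rw [hrhs]
    by_cases hrc : r < c.length
    · rw [if_pos hrc, padEmpty_spec]
      rw [rowLine, lastCol_append_of_lt cols c r hrc]
      rw [List.take_of_length_le (by simp), List.map_append]
      congr 1
    · rw [if_neg hrc]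
      have hrm : r < maxLen cols := by omega
      rw [specLines_getD cols r hrm]
      rw [rowLine, rowLine, lastCol_append_of_ge cols c r hrc]
      have hlt := lastCol_lt cols r hrm
      rw [List.take_append_of_le_length (by omega)]

theorem build_spec (cols : List (List String)) :
    cols.foldl (fun (st : List (List String) × Nat) c => (aInner st.2 st.1 c, st.2 + 1)) ([], 0)
      = (specLines cols, cols.length) := by
  induction cols using List.reverseRecOn with
  | nil => simp [specLines, maxLen]
  | append_singleton cols c ih =>
      rw [List.foldl_append, ih]
      simp only [List.foldl_cons, List.foldl_nil, List.length_append, List.length_cons,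
        List.length_nil]
      refine Prod.ext ?_ (by simp)
      show aInner cols.length (specLines cols) c = specLines (cols ++ [c])
      rw [aInner_eq_mergeCol, mergeCol_spec]

theorem tripleFold (d : PySem.Dict String (List String)) (keys : List String)
    (h0 : List String) (st0 : List (List String) × Nat) :
    keys.foldl (fun (st : List String × List (List String) × Nat) key =>
        (st.1 ++ [headerCell key (d.getD key []).length],
          aInner st.2.2 st.2.1 (d.getD key []), st.2.2 + 1)) (h0, st0) =
      (h0 ++ keys.map (fun k => headerCell k (d.getD k []).length),
        (keys.map (fun k => d.getD k [])).foldl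
          (fun (st : List (List String) × Nat) c => (aInner st.2 st.1 c, st.2 + 1)) st0) := by
  induction keys generalizing h0 st0 with
  | nil => simp
  | cons k ks ih => simp [ih]

theorem zip_map_header (keys : List String) (f : String → List String) :
    (keys.zip (keys.map f)).map (fun p => headerCell p.1 p.2.length) =
      keys.map (fun k => headerCell k (f k).length) := by
  induction keys with
  | nil => simp
  | cons k ks ih => simp [ih]

-- ===== VERDICT (by name: the statement is the Claim_ definition above) =====
theorem dict_to_columns_spec : Claim_equal_dict_to_columns := by
  intro data _
  show dict_to_columns data = dict_to_columns_alt data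
  rw [dict_to_columns, dict_to_columns_alt]
  dsimp only
  rw [tripleFold, build_spec, zip_map_header]
  simp [specLines, maxLen]
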